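-- pv_equiv track=rewrite | github.com/yyloong/phonetic_dialectgen | misc/yu_bao_ipa_flavor/list_fayin_sets.py | get_fayin_sets
-- ===== SOURCE A (Python) =====
-- def get_fayin_sets(spot):
--     shengmu_set = set()
--     yunmu_set = set()
--     shengdiao_set = set()
--     for fayin_list in spot["char_info"].values():
--         for fayin in fayin_list:
--             shengmu, yunmu, shengdiao, _ = fayin
--             shengmu_set.add(shengmu)
--             yunmu_set.add(yunmu)
--             shengdiao_set.add(shengdiao)
--     return shengmu_set, yunmu_set, shengdiao_set
-- ===== SOURCE B (Python) =====
-- def get_fayin_sets(spot):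
--     all_fayin = [fayin for fayin_list in spot["char_info"].values() for fayin in fayin_list]
--     if not all_fayin:
--         return set(), set(), set()
--     shengmu, yunmu, shengdiao, _ = zip(*all_fayin)
--     return set(shengmu), set(yunmu), set(shengdiao)
-- ===== Notes on version B (the rewrite author's own statement) =====
-- stated objective: simpler
-- what changed: B flattens all pronunciation entries into one list with a comprehension and transposes it with zip(*...), taking set() of each of the three columns, instead of A's element-by-element adds into three accumulator sets.
import Mathlib
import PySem

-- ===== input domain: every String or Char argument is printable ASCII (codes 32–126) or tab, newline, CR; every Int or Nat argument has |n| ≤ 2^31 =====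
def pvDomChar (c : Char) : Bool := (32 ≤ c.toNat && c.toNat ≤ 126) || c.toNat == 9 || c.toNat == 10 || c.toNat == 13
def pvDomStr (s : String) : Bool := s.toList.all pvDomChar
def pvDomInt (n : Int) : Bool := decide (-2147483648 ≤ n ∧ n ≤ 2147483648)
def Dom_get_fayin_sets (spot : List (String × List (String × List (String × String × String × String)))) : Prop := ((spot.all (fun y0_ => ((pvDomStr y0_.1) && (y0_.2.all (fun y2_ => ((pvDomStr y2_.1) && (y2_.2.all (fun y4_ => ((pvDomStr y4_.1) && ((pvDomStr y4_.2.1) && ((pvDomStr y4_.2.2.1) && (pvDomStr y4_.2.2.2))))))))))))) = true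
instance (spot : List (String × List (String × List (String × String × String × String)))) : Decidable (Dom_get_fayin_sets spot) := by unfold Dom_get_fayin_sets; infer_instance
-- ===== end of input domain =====

-- B replaces A's element-by-element adds into three accumulator sets by flatten-then-transpose
-- (one comprehension, zip(*...), set() of each column); same cost, simpler shape. Return-value equivalence only.

-- ===== PORT A =====
def get_fayin_sets (spot : List (String × List (String × List (String × String × String × String)))) : List String × List String × List String :=
  -- shengmu_set = set(); yunmu_set = set(); shengdiao_set = set()
  -- for fayin_list in spot["char_info"].values(): for fayin in fayin_list: add components
  let ci := (PySem.Dict.mk spot).getD "char_info" []   -- spot["char_info"]; Pre_ excludes the KeyError case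
  ((PySem.Dict.mk ci).values).foldl
    (fun s fayin_list =>
      fayin_list.foldl
        (fun (t : List String × List String × List String) fayin =>
          (PySem.Set.add t.1 fayin.1, PySem.Set.add t.2.1 fayin.2.1, PySem.Set.add t.2.2 fayin.2.2.1))
        s)
    (PySem.Set.empty, PySem.Set.empty, PySem.Set.empty)

-- ===== PORT B =====
def get_fayin_sets_alt (spot : List (String × List (String × List (String × String × String × String)))) : List String × List String × List String :=
  let ci := (PySem.Dict.mk spot).getD "char_info" []
  let all_fayin := ((PySem.Dict.mk ci).values).flatMap (fun fayin_list => fayin_list)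
  if all_fayin = [] then (PySem.Set.empty, PySem.Set.empty, PySem.Set.empty)
  else
    -- zip(*all_fayin) transposes; the first three columns, each made a set
    (PySem.Set.ofList (all_fayin.map (·.1)),
     PySem.Set.ofList (all_fayin.map (·.2.1)),
     PySem.Set.ofList (all_fayin.map (·.2.2.1)))

-- ===== PRECONDITION & SPEC =====
-- A raises KeyError when "char_info" is not a key of spot; excluded.
def Pre_get_fayin_sets (spot : List (String × List (String × List (String × String × String × String)))) : Prop :=
  "char_info" ∈ spot.map Prod.fst
instance (spot : List (String × List (String × List (String × String × String × String)))) : Decidable (Pre_get_fayin_sets spot) := by unfold Pre_get_fayin_sets; infer_instance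
def pvWitness_get_fayin_sets : (List (String × List (String × List (String × String × String × String)))) :=
  [("char_info", [("a", [("s", "y", "d", "x")])])]
def Spec_get_fayin_sets (spot : List (String × List (String × List (String × String × String × String)))) (out : List String × List String × List String) : Prop := out = get_fayin_sets_alt spot
instance (spot : List (String × List (String × List (String × String × String × String)))) (out : List String × List String × List String) : Decidable (Spec_get_fayin_sets spot out) := by unfold Spec_get_fayin_sets; infer_instance

-- ===== CLAIM =====
def Claim_equal_get_fayin_sets : Prop := ∀ (spot : List (String × List (String × List (String × String × String × String)))), Dom_get_fayin_sets spot → Pre_get_fayin_sets spot → Spec_get_fayin_sets spot (get_fayin_sets spot)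

-- ===== LEMMAS AND PROOFS =====

-- A's inner loop splits into three independent component folds.
theorem inner_foldl_split (l : List (String × String × String × String))
    (s : List String × List String × List String) :
    l.foldl
      (fun (t : List String × List String × List String) fayin =>
        (PySem.Set.add t.1 fayin.1, PySem.Set.add t.2.1 fayin.2.1, PySem.Set.add t.2.2 fayin.2.2.1))
      s
    = (l.foldl (fun u f => PySem.Set.add u f.1) s.1,
       l.foldl (fun u f => PySem.Set.add u f.2.1) s.2.1,
       l.foldl (fun u f => PySem.Set.add u f.2.2.1) s.2.2) := by
  induction l generalizing s with
  | nil => rfl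
  | cons a l ih => simp [List.foldl, ih]

-- A's nested loops over the value lists equal one fold over the flattened list.
theorem outer_foldl_flatten (vs : List (List (String × String × String × String)))
    (s : List String × List String × List String) :
    vs.foldl
      (fun s fayin_list =>
        fayin_list.foldl
          (fun (t : List String × List String × List String) fayin =>
            (PySem.Set.add t.1 fayin.1, PySem.Set.add t.2.1 fayin.2.1, PySem.Set.add t.2.2 fayin.2.2.1))
          s)
      s
    = (vs.flatMap (fun l => l)).foldl
        (fun (t : List String × List String × List String) fayin =>
          (PySem.Set.add t.1 fayin.1, PySem.Set.add t.2.1 fayin.2.1, PySem.Set.add t.2.2 fayin.2.2.1))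
        s := by
  induction vs generalizing s with
  | nil => rfl
  | cons v vs ih => simp [List.foldl, List.flatMap_cons, List.foldl_append, ih]

-- folding Set.add of a projected component is ofList of the mapped column
theorem foldl_add_map {α β : Type} [BEq α] (l : List β) (f : β → α) :
    l.foldl (fun u b => PySem.Set.add u (f b)) PySem.Set.empty = PySem.Set.ofList (l.map f) := by
  rw [← PySem.Set.update_map_eq_foldl_add]
  simp [PySem.Set.update_nil_left]

-- the three component folds over the flattened list are B's if/zip-columns expression
theorem cols_eq (vs : List (List (String × String × String × String))) :
    ((vs.flatMap (fun l => l)).foldl (fun u f => PySem.Set.add u f.1) PySem.Set.empty,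
     (vs.flatMap (fun l => l)).foldl (fun u f => PySem.Set.add u f.2.1) PySem.Set.empty,
     (vs.flatMap (fun l => l)).foldl (fun u f => PySem.Set.add u f.2.2.1) PySem.Set.empty)
    = if vs.flatMap (fun l => l) = [] then (PySem.Set.empty, PySem.Set.empty, PySem.Set.empty)
      else (PySem.Set.ofList ((vs.flatMap (fun l => l)).map (·.1)),
            PySem.Set.ofList ((vs.flatMap (fun l => l)).map (·.2.1)),
            PySem.Set.ofList ((vs.flatMap (fun l => l)).map (·.2.2.1))) := by
  by_cases h : vs.flatMap (fun l => l) = []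
  · rw [if_pos h, h]; rfl
  · rw [if_neg h, foldl_add_map, foldl_add_map, foldl_add_map]

-- ===== VERDICT =====
theorem get_fayin_sets_spec : Claim_equal_get_fayin_sets := by
  intro spot _ _
  unfold Spec_get_fayin_sets get_fayin_sets get_fayin_sets_alt
  rw [outer_foldl_flatten, inner_foldl_split]
  exact cols_eq _
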